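-- pv_equiv track=rewrite | github.com/Pradeep-Deep14/Sep-9_24 | 7.py | separate_char_and_int
-- ===== SOURCE A (Python) =====
-- a="str12prad23"
--
-- def separate_char_and_int(a):
--     a1=""
--     a2=""
--     for i in a:
--         if i.isdigit():
--             a1+=i
--         else:
--             a2+=i
--     return a1,a2
-- ===== SOURCE B (Python) =====
-- def separate_char_and_int(a):
--     s = sorted(a, key=lambda c: 0 if c.isdigit() else 1)
--     k = sum(1 for c in a if c.isdigit())
--     return ''.join(s[:k]), ''.join(s[k:])
-- ===== Notes on version B (the rewrite author's own statement) =====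
-- stated objective: alternative
-- what changed: Instead of one partitioning loop with two accumulators, B stably sorts the characters with a key that orders digits before every other character and splits the sorted list at the digit count; stability guarantees the same relative orders.
import Mathlib
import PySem

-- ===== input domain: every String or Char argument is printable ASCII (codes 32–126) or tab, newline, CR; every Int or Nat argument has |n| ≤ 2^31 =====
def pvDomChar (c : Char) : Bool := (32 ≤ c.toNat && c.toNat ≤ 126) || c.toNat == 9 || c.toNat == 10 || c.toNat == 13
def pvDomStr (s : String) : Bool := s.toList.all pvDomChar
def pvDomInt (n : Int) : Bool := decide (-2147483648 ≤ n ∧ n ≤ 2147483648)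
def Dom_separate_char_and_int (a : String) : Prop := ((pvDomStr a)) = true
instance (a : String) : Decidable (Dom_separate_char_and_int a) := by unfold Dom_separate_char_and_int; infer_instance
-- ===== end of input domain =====

-- B replaces A's single partitioning loop by a a stable sort keyed to put digits before other characters
-- followed by a split at the digit count (alternative algorithm; same return value).

-- ===== PORT A =====
-- one loop over the characters, branching into two accumulators (a1+=i / a2+=i)
def separate_char_and_int (a : String) : String × String :=
  let r := a.toList.foldl
    (fun (acc : List Char × List Char) i =>
      if PySem.Chars.isdigit i then (acc.1 ++ [i], acc.2) else (acc.1, acc.2 ++ [i]))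
    ([], [])
  (String.mk r.1, String.mk r.2)

-- ===== PORT B =====
-- stable sort by key (0 for digits, 1 otherwise), count digits, split there
def separate_char_and_int_alt (a : String) : String × String :=
  let s := PySem.List.sorted a.toList (fun c => if PySem.Chars.isdigit c then (0 : Int) else 1)
  let k : Int := a.toList.foldl (fun acc c => acc + (if PySem.Chars.isdigit c then 1 else 0)) 0
  (String.mk (PySem.List.slice s none (some k)), String.mk (PySem.List.slice s (some k) none))

-- ===== PRECONDITION & SPEC =====
def Spec_separate_char_and_int (a : String) (out : String × String) : Prop := out = separate_char_and_int_alt a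
instance (a : String) (out : String × String) : Decidable (Spec_separate_char_and_int a out) := by unfold Spec_separate_char_and_int; infer_instance

-- ===== CLAIM (what is proved, stated in full; the proofs are below) =====
def Claim_equal_separate_char_and_int : Prop := ∀ (a : String), Dom_separate_char_and_int a → Spec_separate_char_and_int a (separate_char_and_int a)

-- ===== LEMMAS AND PROOFS =====

-- A's loop computes (digits, non-digits) in order
theorem sep_foldl_eq (l : List Char) (s1 s2 : List Char) :
    l.foldl
      (fun (acc : List Char × List Char) i =>
        if PySem.Chars.isdigit i then (acc.1 ++ [i], acc.2) else (acc.1, acc.2 ++ [i]))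
      (s1, s2)
    = (s1 ++ l.filter (fun c => PySem.Chars.isdigit c),
       s2 ++ l.filter (fun c => !PySem.Chars.isdigit c)) := by
  induction l generalizing s1 s2 with
  | nil => simp
  | cons c t ih =>
    by_cases h : PySem.Chars.isdigit c = true <;>
      simp [List.foldl, h, ih, List.filter]

-- the comparator used by sorted with key (digit ↦ 0, other ↦ 1), reverse = false
def sepBefore (x y : Char) : Bool :=
  decide ((if PySem.Chars.isdigit x then (0 : Int) else 1) < (if PySem.Chars.isdigit y then (0 : Int) else 1))

theorem insertBy_digit (x : Char) (hx : PySem.Chars.isdigit x = true)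
    (d n : List Char) (hd : ∀ c ∈ d, PySem.Chars.isdigit c = true)
    (hn : ∀ c ∈ n, PySem.Chars.isdigit c = false) :
    PySem.List.insertBy sepBefore x (d ++ n) = d ++ x :: n := by
  induction d with
  | nil =>
    cases n with
    | nil => simp [PySem.List.insertBy]
    | cons y ys =>
      have hy := hn y (by simp)
      simp [PySem.List.insertBy, sepBefore, hx, hy]
  | cons c d' ih =>
    have hc := hd c (by simp)
    have : sepBefore x c = false := by simp [sepBefore, hx, hc]
    simp [PySem.List.insertBy, this,
      ih (fun e he => hd e (by simp [he]))]

theorem insertBy_nondigit (x : Char) (hx : PySem.Chars.isdigit x = false)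
    (l : List Char) :
    PySem.List.insertBy sepBefore x l = l ++ [x] := by
  induction l with
  | nil => simp [PySem.List.insertBy]
  | cons y ys ih =>
    have : sepBefore x y = false := by
      by_cases hy : PySem.Chars.isdigit y = true <;> simp [sepBefore, hx, hy]
    simp [PySem.List.insertBy, this, ih]

-- invariant of the insertion-sort fold: the accumulator stays digits ++ non-digits
theorem sort_fold_part (l d n : List Char)
    (hd : ∀ c ∈ d, PySem.Chars.isdigit c = true)
    (hn : ∀ c ∈ n, PySem.Chars.isdigit c = false) :
    l.foldl (fun acc x => PySem.List.insertBy sepBefore x acc) (d ++ n)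
    = (d ++ l.filter (fun c => PySem.Chars.isdigit c))
      ++ (n ++ l.filter (fun c => !PySem.Chars.isdigit c)) := by
  induction l generalizing d n with
  | nil => simp
  | cons x t ih =>
    by_cases hx : PySem.Chars.isdigit x = true
    · have h1 : PySem.List.insertBy sepBefore x (d ++ n) = (d ++ [x]) ++ n := by
        simpa using insertBy_digit x hx d n hd hn
      have h2 := ih (d ++ [x]) n
        (fun c hc => by rcases List.mem_append.1 hc with h | h
                        · exact hd c h
                        · simp at h; subst h; exact hx) hn
      simp only [List.foldl_cons, h1, h2]
      simp [List.filter, hx]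
    · have hx' : PySem.Chars.isdigit x = false := by simpa using hx
      have h1 : PySem.List.insertBy sepBefore x (d ++ n) = d ++ (n ++ [x]) := by
        simpa using insertBy_nondigit x hx' (d ++ n)
      have h2 := ih d (n ++ [x]) hd
        (fun c hc => by rcases List.mem_append.1 hc with h | h
                        · exact hn c h
                        · simp at h; subst h; exact hx')
      simp only [List.foldl_cons, h1, h2]
      simp [List.filter, hx']

theorem sorted_part (l : List Char) :
    PySem.List.sorted l (fun c => if PySem.Chars.isdigit c then (0 : Int) else 1)
    = l.filter (fun c => PySem.Chars.isdigit c) ++ l.filter (fun c => !PySem.Chars.isdigit c) := by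
  have := sort_fold_part l [] [] (by simp) (by simp)
  simpa [PySem.List.sorted, sepBefore] using this

-- B's counting fold computes the number of digits
theorem count_fold (l : List Char) (s : Int) :
    l.foldl (fun acc c => acc + (if PySem.Chars.isdigit c then 1 else 0)) s
    = s + ((l.filter (fun c => PySem.Chars.isdigit c)).length : Int) := by
  induction l generalizing s with
  | nil => simp
  | cons c t ih =>
    by_cases h : PySem.Chars.isdigit c = true <;>
      simp [List.foldl, h, ih, List.filter] <;> ring

-- ===== VERDICT (by name: the statement is the Claim_ definition above) =====
theorem separate_char_and_int_spec : Claim_equal_separate_char_and_int := by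
  intro a _
  unfold Spec_separate_char_and_int separate_char_and_int separate_char_and_int_alt
  have hk := count_fold a.toList 0
  simp only [hk, zero_add]
  rw [sorted_part, sep_foldl_eq]
  rw [PySem.List.slice_to_natCast, PySem.List.slice_from_natCast]
  simp
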